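-- pv_equiv track=rewrite | github.com/kbnetz/SMILESanalysis | SMILES Analyzer Finalized.py | check_SMILES
-- ===== SOURCE A (Python) =====
-- accepted_characters = ['C', 'c', 'H', 'N', 'n', 'O', 'o', 'B', 'S', 's', 'P', 'F', 'Cl', 'Br', '-', '.', '=', '#', '$', '@', '(', ')', '[', ']', '/', '\\', '1', '2', '3', '4', '5', '6', '7', '8', '9', '0']
--
-- def check_SMILES(SMILES):
--     SMILES_list = list(SMILES)
--     SMILES_list.append('-')
--     accepted_numbers = 0
--     for index_i in range(len(SMILES_list) - 1):
--         try:
--             index_i_int = int(SMILES_list[index_i])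
--             index_i1_int = int(SMILES_list[index_i + 1])
--             if SMILES_list[index_i].isdigit() and SMILES_list[index_i + 1].isdigit():
--                 accepted_numbers += 1
--             else:
--                 pass
--         except:
--             pass
--     accepted_elements = 0
--     for character in SMILES_list:
--         if character not in accepted_characters:
--             accepted_elements += 1
--         else:
--             pass
--     if accepted_numbers == 0 and accepted_elements == 0:
--         SMILES_ok = True
--     else:
--         SMILES_ok = False
--     return SMILES_ok
-- ===== SOURCE B (Python) =====
-- accepted_characters = ['C', 'c', 'H', 'N', 'n', 'O', 'o', 'B', 'S', 's', 'P', 'F', 'Cl', 'Br', '-', '.', '=', '#', '$', '@', '(', ')', '[', ']', '/', '\\', '1', '2', '3', '4', '5', '6', '7', '8', '9', '0']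
--
-- _ACCEPTED = frozenset(accepted_characters)
-- _DIGITS = frozenset('0123456789')
--
-- def check_SMILES(SMILES):
--     # single-pass two-state automaton: carry whether the previous character was a
--     # digit; reject immediately on an unaccepted character or a digit after a digit.
--     prev_digit = False
--     for c in SMILES:
--         if c not in _ACCEPTED:
--             return False
--         is_d = c in _DIGITS
--         if prev_digit and is_d:
--             return False
--         prev_digit = is_d
--     return True
-- ===== Notes on version B (the rewrite author's own statement) =====
-- stated objective: faster
-- what changed: Replaces A's two staged counting passes (sentinel append, try/except int() probe per adjacent index pair, then a membership-violation counter over a list) by a single-pass two-state automaton with frozenset membership that carries whether the previous character was a digit and returns False at the first unaccepted character or digit-after-digit pair.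
import Mathlib
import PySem

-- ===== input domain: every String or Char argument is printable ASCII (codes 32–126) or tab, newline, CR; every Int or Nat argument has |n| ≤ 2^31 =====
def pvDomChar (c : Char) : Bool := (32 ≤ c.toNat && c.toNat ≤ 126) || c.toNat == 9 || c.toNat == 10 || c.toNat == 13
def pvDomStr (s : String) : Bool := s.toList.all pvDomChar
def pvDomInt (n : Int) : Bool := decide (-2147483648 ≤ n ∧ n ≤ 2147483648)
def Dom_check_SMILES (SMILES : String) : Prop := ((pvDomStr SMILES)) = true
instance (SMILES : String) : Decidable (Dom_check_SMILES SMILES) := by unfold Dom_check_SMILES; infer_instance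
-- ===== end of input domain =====

-- B replaces A's two staged counting passes (sentinel append + try/except int() probe per
-- adjacent pair, then a membership-violation counter) by a single-pass two-state automaton
-- carrying whether the previous character was a digit, rejecting early; measured faster (constant-factor: no try/except, frozenset lookup, early exit).


-- ===== PORT A =====
-- accepted_characters: one-char and two-char entries, kept as List Char entries so the
-- per-character membership test 'character not in accepted_characters' is exact.
def pvAccepted : List (List Char) :=
  [['C'], ['c'], ['H'], ['N'], ['n'], ['O'], ['o'], ['B'], ['S'], ['s'], ['P'], ['F'],
   ['C','l'], ['B','r'], ['-'], ['.'], ['='], ['#'], ['$'], ['@'], ['('], [')'],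
   ['['], [']'], ['/'], ['\\'], ['1'], ['2'], ['3'], ['4'], ['5'], ['6'], ['7'], ['8'], ['9'], ['0']]

def check_SMILES (SMILES : String) : Bool :=
  let l := SMILES.toList ++ ['-']
  -- try: int(l[i]); int(l[i+1]) — an exception (either conversion fails) skips the body
  let acceptedNumbers : Int :=
    (PySem.List.pyRange 0 (PySem.List.len l - 1)).foldl
      (fun acc i =>
        let ci := PySem.List.pyGetD l i ' '
        let ci1 := PySem.List.pyGetD l (i + 1) ' '
        if (PySem.Int.ofChars? [ci]).isSome && (PySem.Int.ofChars? [ci1]).isSome then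
          if PySem.Chars.isdigit ci && PySem.Chars.isdigit ci1 then acc + 1 else acc
        else acc) 0
  let acceptedElements : Int :=
    l.foldl (fun acc c => if [c] ∉ pvAccepted then acc + 1 else acc) 0
  if acceptedNumbers = 0 ∧ acceptedElements = 0 then true else false

-- ===== PORT B =====
def pvDigits : List Char := ['0','1','2','3','4','5','6','7','8','9']  -- frozenset('0123456789')

-- the for-loop of Source B: one pass, state = "previous character was a digit"
def pvGo : List Char → Bool → Bool
  | [], _ => true
  | c :: cs, prev =>
    if [c] ∉ pvAccepted then false
    else
      let isD := decide (c ∈ pvDigits)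
      if prev && isD then false
      else pvGo cs isD

def check_SMILES_alt (SMILES : String) : Bool :=
  pvGo SMILES.toList false

-- ===== PRECONDITION & SPEC =====
def Spec_check_SMILES (SMILES : String) (out : Bool) : Prop := out = check_SMILES_alt SMILES
instance (SMILES : String) (out : Bool) : Decidable (Spec_check_SMILES SMILES out) := by unfold Spec_check_SMILES; infer_instance

-- ===== CLAIM (what is proved, stated in full; the proofs are below) =====
def Claim_equal_check_SMILES : Prop := ∀ (SMILES : String), Dom_check_SMILES SMILES → Spec_check_SMILES SMILES (check_SMILES SMILES)

-- ===== LEMMAS AND PROOFS =====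

lemma zip_forall_iff (cs : List Char) :
    (∀ p ∈ cs.zip cs.tail, ¬(p.1 ∈ pvDigits ∧ p.2 ∈ pvDigits)) ↔
      ∀ (j : Nat) (h : j + 1 < cs.length), ¬(cs[j] ∈ pvDigits ∧ cs[j+1] ∈ pvDigits) := by
  constructor
  · intro hall j h
    apply hall (cs[j], cs[j+1])
    rw [List.mem_iff_getElem]
    exact ⟨j, by simp [List.length_zip, List.length_tail]; omega,
      by simp [List.getElem_zip, List.getElem_tail]⟩
  · intro hidx p hp
    obtain ⟨i, hi, rfl⟩ := List.mem_iff_getElem.mp hp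
    simp only [List.length_zip, List.length_tail, lt_min_iff] at hi
    have := hidx i (by omega)
    simpa [List.getElem_zip, List.getElem_tail] using this

lemma pvGo_iff (cs : List Char) (prev : Bool) :
    pvGo cs prev = true ↔
      ((∀ c ∈ cs, [c] ∈ pvAccepted) ∧
       (¬(prev = true ∧ ∃ c ∈ cs.head?, c ∈ pvDigits)) ∧
       ∀ p ∈ cs.zip cs.tail, ¬(p.1 ∈ pvDigits ∧ p.2 ∈ pvDigits)) := by
  induction cs generalizing prev with
  | nil => simp [pvGo]
  | cons c rest ih =>
    by_cases hc : [c] ∈ pvAccepted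
    · by_cases hd : c ∈ pvDigits
      · cases prev with
        | false =>
          simp only [pvGo, hc, hd]
          simp only [not_true_eq_false, if_false, decide_true, Bool.false_and,
            Bool.false_eq_true, if_false]
          rw [ih]
          cases rest with
          | nil => simp [hc]
          | cons r rs =>
            simp only [List.mem_cons, List.head?_cons, List.tail_cons, List.zip_cons_cons,
              Option.mem_some_iff]
            constructor
            · rintro ⟨h1, h2, h3⟩
              refine ⟨fun x hx => by rcases hx with rfl | hx; exact hc; exact h1 x hx,
                by simp, ?_⟩
              intro p hp
              rcases hp with hp | hp
              · subst hp
                intro ⟨_, hr⟩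
                exact h2 ⟨trivial, r, rfl, hr⟩
              · exact h3 p hp
            · rintro ⟨h1, _, h3⟩
              refine ⟨fun x hx => h1 x (by simp [hx]), ?_, fun p hp => h3 p (by simp [hp])⟩
              rintro ⟨_, x, hx, hxd⟩
              subst hx
              exact h3 (c, r) (Or.inl rfl) ⟨hd, hxd⟩
        | true =>
          simp only [pvGo, hc, hd]
          simp only [not_true_eq_false, if_false, decide_true, Bool.true_and, if_true]
          simp [hd]
      · simp only [pvGo, hc, hd]
        simp only [not_true_eq_false, if_false, decide_false, Bool.and_false,
          Bool.false_eq_true, if_false]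
        rw [ih]
        cases rest with
        | nil => simp [hc, hd]
        | cons r rs =>
          simp only [List.mem_cons, List.head?_cons, List.tail_cons, List.zip_cons_cons,
            Option.mem_some_iff]
          constructor
          · rintro ⟨h1, h2, h3⟩
            refine ⟨fun x hx => by rcases hx with rfl | hx; exact hc; exact h1 x hx,
              by simp [hd], ?_⟩
            intro p hp
            rcases hp with hp | hp
            · subst hp; exact fun ⟨h, _⟩ => hd h
            · exact h3 p hp
          · rintro ⟨h1, _, h3⟩
            refine ⟨fun x hx => h1 x (by simp [hx]), ?_, fun p hp => h3 p (by simp [hp])⟩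
            rintro ⟨hp, _⟩
            exact absurd hp (by simp)
    · simp [pvGo, hc]

lemma charB (s : String) :
    check_SMILES_alt s = true ↔
      ((∀ (j : Nat) (h : j + 1 < s.toList.length), ¬(s.toList[j] ∈ pvDigits ∧ s.toList[j+1] ∈ pvDigits))
        ∧ ∀ c ∈ s.toList, [c] ∈ pvAccepted) := by
  unfold check_SMILES_alt
  rw [pvGo_iff, ← zip_forall_iff]
  simp only [Bool.false_eq_true, false_and, not_false_iff, true_and]
  tauto

lemma isdigit_eq_mem (c : Char) : PySem.Chars.isdigit c = decide (c ∈ pvDigits) := by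
  simp only [PySem.Chars.isdigit, pvDigits]
  rw [Bool.eq_iff_iff]
  simp only [Bool.and_eq_true, decide_eq_true_eq, List.mem_cons, List.not_mem_nil, or_false,
    Char.le_def, Char.ext_iff, UInt32.le_iff_toNat_le, UInt32.ext_iff,
    show '0'.val.toNat = 48 from rfl, show '1'.val.toNat = 49 from rfl,
    show '2'.val.toNat = 50 from rfl, show '3'.val.toNat = 51 from rfl,
    show '4'.val.toNat = 52 from rfl, show '5'.val.toNat = 53 from rfl,
    show '6'.val.toNat = 54 from rfl, show '7'.val.toNat = 55 from rfl,
    show '8'.val.toNat = 56 from rfl, show '9'.val.toNat = 57 from rfl]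
  omega

lemma ofChars?_isSome_of_digit (c : Char) (h : c ∈ pvDigits) :
    (PySem.Int.ofChars? [c]).isSome = true := by
  fin_cases h <;> decide

lemma bodyA_eq (acc : Int) (a b : Char) :
    (if (PySem.Int.ofChars? [a]).isSome && (PySem.Int.ofChars? [b]).isSome then
       if PySem.Chars.isdigit a && PySem.Chars.isdigit b then acc + 1 else acc
     else acc)
    = (if decide (a ∈ pvDigits) && decide (b ∈ pvDigits) then acc + 1 else acc) := by
  rw [isdigit_eq_mem, isdigit_eq_mem]
  by_cases ha : a ∈ pvDigits <;> by_cases hb : b ∈ pvDigits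
  · rw [ofChars?_isSome_of_digit a ha, ofChars?_isSome_of_digit b hb]
    simp [ha, hb]
  all_goals simp [ha, hb]

lemma charA (s : String) :
    check_SMILES s = true ↔
      ((∀ (j : Nat) (h : j + 1 < s.toList.length), ¬(s.toList[j] ∈ pvDigits ∧ s.toList[j+1] ∈ pvDigits))
        ∧ ∀ c ∈ s.toList, [c] ∈ pvAccepted) := by
  unfold check_SMILES
  have hlen : PySem.List.len (s.toList ++ ['-']) - 1 = ((s.toList.length : Nat) : Int) := by
    simp [PySem.List.len]
  have hget : ∀ (k : Nat) (hk : k < s.toList.length),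
      PySem.List.pyGetD (s.toList ++ ['-']) (k : Int) ' ' = s.toList[k]'hk := by
    intro k hk
    rw [PySem.List.pyGetD_natCast,
      List.getD_eq_getElem _ _ (by simp only [List.length_append, List.length_cons, List.length_nil]; omega)]
    exact List.getElem_append_left hk
  have hlast : PySem.List.pyGetD (s.toList ++ ['-']) ((s.toList.length : Nat) : Int) ' ' = '-' := by
    rw [PySem.List.pyGetD_natCast, List.getD_eq_getElem _ _ (by simp)]
    simp
  simp only [bodyA_eq]
  rw [hlen, PySem.List.pyRange_zero_natCast, List.foldl_map]
  rw [PySem.List.foldl_count_if (fun k : Nat =>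
        decide (PySem.List.pyGetD (s.toList ++ ['-']) (k : Int) ' ' ∈ pvDigits) &&
        decide (PySem.List.pyGetD (s.toList ++ ['-']) ((k : Int) + 1) ' ' ∈ pvDigits))]
  have hcnt2 := PySem.List.foldl_count_if (fun c : Char => decide ([c] ∉ pvAccepted)) (s.toList ++ ['-']) 0
  simp only [decide_eq_true_eq] at hcnt2
  rw [hcnt2]
  split_ifs with hP
  · simp only [true_iff]
    obtain ⟨h1, h2⟩ := hP
    have h1' : ∀ k ∈ List.range s.toList.length,
        ¬((decide (PySem.List.pyGetD (s.toList ++ ['-']) (k : Int) ' ' ∈ pvDigits) &&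
          decide (PySem.List.pyGetD (s.toList ++ ['-']) ((k : Int) + 1) ' ' ∈ pvDigits)) = true) := by
      rw [← List.countP_eq_zero]; omega
    have h2' : ∀ c ∈ s.toList ++ ['-'], ¬(decide ([c] ∉ pvAccepted) = true) := by
      rw [← List.countP_eq_zero]; omega
    constructor
    · intro j hj
      have := h1' j (List.mem_range.mpr (by omega))
      rw [hget j (by omega)] at this
      rw [show ((j : Int) + 1) = ((j + 1 : Nat) : Int) by omega] at this
      rw [hget (j+1) (by omega)] at this
      simpa using this
    · intro c hc
      have := h2' c (by simp [hc])
      simpa using this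
  · simp only [false_iff]
    intro ⟨hpair, helem⟩
    apply hP
    constructor
    · have : List.countP (fun k : Nat =>
          decide (PySem.List.pyGetD (s.toList ++ ['-']) (k : Int) ' ' ∈ pvDigits) &&
          decide (PySem.List.pyGetD (s.toList ++ ['-']) ((k : Int) + 1) ' ' ∈ pvDigits))
          (List.range s.toList.length) = 0 := by
        rw [List.countP_eq_zero]
        intro k hk
        have hk' : k < s.toList.length := List.mem_range.mp hk
        rw [hget k hk']
        by_cases hk1 : k + 1 < s.toList.length
        · rw [show ((k : Int) + 1) = ((k + 1 : Nat) : Int) by omega, hget (k+1) hk1]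
          simpa using hpair k hk1
        · rw [show ((k : Int) + 1) = ((s.toList.length : Nat) : Int) by omega, hlast]
          simp [pvDigits]
      omega
    · have : List.countP (fun c : Char => decide ([c] ∉ pvAccepted)) (s.toList ++ ['-']) = 0 := by
        rw [List.countP_eq_zero]
        intro c hc
        simp only [List.mem_append, List.mem_singleton] at hc
        rcases hc with hc | rfl
        · simp [helem c hc]
        · simp [pvAccepted]
      omega

-- ===== VERDICT (by name: the statement is the Claim_ definition above) =====
theorem check_SMILES_spec : Claim_equal_check_SMILES := by
  intro s _
  unfold Spec_check_SMILES
  rw [Bool.eq_iff_iff, charA, charB]
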